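-- pv_equiv track=rewrite | github.com/rebuilder945/FL_research | ast_research/python_code_5.23/lastterm_page7/success_code/张文博-3225-2023-06-10_21_13_01.py | work
-- ===== SOURCE A (Python) =====
-- def work(a) :
--     b=[]
--     c=[]
--     e=2
--     for x in range(a):
--         b.append(x)
--         if x!=0:
--             e=e*b[x]
--             c.append(e)
--         else:
--             c.append(1)
--     d=dict(zip(b,c))
--     return d
-- ===== SOURCE B (Python) =====
-- def _prod(lo, hi):
--     """product of the integers in [lo, hi) by a balanced split"""
--     if hi - lo <= 0:
--         return 1
--     if hi - lo == 1:
--         return lo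
--     mid = (lo + hi) // 2
--     return _prod(lo, mid) * _prod(mid, hi)
--
--
-- def work(a):
--     items = []
--     p = 2 * _prod(1, a)            # p == 2*(a-1)!  (== 2 when a <= 1)
--     for x in range(a - 1, 0, -1):  # keys a-1 .. 1, back to front
--         items.append((x, p))       # value at x is 2*x!
--         p //= x                    # exact division: now p == 2*(x-1)!
--     if a >= 1:
--         items.append((0, 1))
--     items.reverse()
--     return dict(items)
-- ===== Notes on version B (the rewrite author's own statement) =====
-- stated objective: alternative
-- what changed: B replaces A's forward pass with a running product by a divide-and-conquer product tree computing the single total 2*(a-1)!, then fills the table back-to-front deriving each value by exact division p //= x, and reverses the list before building the dict.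
import Mathlib
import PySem

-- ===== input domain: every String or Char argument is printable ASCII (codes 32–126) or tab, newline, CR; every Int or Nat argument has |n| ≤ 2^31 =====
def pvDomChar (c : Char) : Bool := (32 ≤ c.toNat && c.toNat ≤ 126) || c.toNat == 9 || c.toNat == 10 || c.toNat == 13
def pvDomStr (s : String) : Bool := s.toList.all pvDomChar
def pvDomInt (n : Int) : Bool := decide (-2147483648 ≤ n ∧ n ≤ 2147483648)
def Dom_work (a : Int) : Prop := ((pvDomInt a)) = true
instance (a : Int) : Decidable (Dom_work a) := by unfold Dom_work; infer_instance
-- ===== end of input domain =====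

-- B replaces A's forward running-product pass by a divide-and-conquer product tree for the
-- total 2*(a-1)!, then fills the table back-to-front by exact division; equal return values.

-- ===== PORT A =====
-- loop body: b.append(x); if x != 0: e = e*b[x]; c.append(e) else c.append(1)
def workStep (s : List Int × List Int × Int) (x : Int) : List Int × List Int × Int :=
  let b := s.1 ++ [x]
  if x ≠ 0 then
    -- b[x]: x is a valid nonnegative index here (b = [0,…,x]); pyGetD's default is never used
    let e := s.2.2 * PySem.List.pyGetD b x 0
    (b, s.2.1 ++ [e], e)
  else
    (b, s.2.1 ++ [1], s.2.2)

def work (a : Int) : List (Int × Int) :=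
  let s := (PySem.List.pyRange 0 a 1).foldl workStep ([], [], 2)
  (PySem.Dict.ofList (s.1.zip s.2.1)).items

-- ===== PORT B =====
-- _prod(lo, hi): product of the integers in [lo, hi) by a balanced split
def prodTree (lo hi : Int) : Int :=
  if _h0 : hi - lo ≤ 0 then 1
  else if _h1 : hi - lo = 1 then lo
  else
    let mid := PySem.Int.floordiv (lo + hi) 2
    prodTree lo mid * prodTree mid hi
termination_by (hi - lo).toNat
decreasing_by
  all_goals
    rw [PySem.Int.floordiv_eq_ediv_of_pos (by omega : (0:Int) < 2)]
    omega

-- loop body: items.append((x, p)); p //= x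
def workAltStep (s : List (Int × Int) × Int) (x : Int) : List (Int × Int) × Int :=
  (s.1 ++ [(x, s.2)], PySem.Int.floordiv s.2 x)

def work_alt (a : Int) : List (Int × Int) :=
  let p := 2 * prodTree 1 a
  let s := (PySem.List.pyRange (a - 1) 0 (-1)).foldl workAltStep ([], p)
  let items := if 1 ≤ a then s.1 ++ [((0 : Int), (1 : Int))] else s.1
  (PySem.Dict.ofList items.reverse).items

-- ===== PRECONDITION & SPEC =====
def Spec_work (a : Int) (out : List (Int × Int)) : Prop := out = work_alt a
instance (a : Int) (out : List (Int × Int)) : Decidable (Spec_work a out) := by unfold Spec_work; infer_instance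

-- ===== CLAIM (what is proved, stated in full; the proofs are below) =====
def Claim_equal_work : Prop := ∀ (a : Int), Dom_work a → Spec_work a (work a)

-- ===== LEMMAS AND PROOFS =====

-- value stored at key x (proof-side characterisation of both programs)
def workVal (x : Int) : Int :=
  if x = 0 then 1 else (PySem.List.pyRange 2 (x + 1) 1).foldl (· * ·) 2

-- A's accumulator value after processing range(0, n)
def workAcc (n : Nat) : Int := if n ≤ 1 then 2 else workVal ((n : Int) - 1)

theorem workVal_succ (n : Nat) (h : 1 ≤ n) :
    workVal (n : Int) = workAcc n * (n : Int) := by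
  rcases Nat.eq_or_lt_of_le h with h1 | h2
  · have : n = 1 := h1.symm
    subst this; decide
  · have hne : ¬ ((n : Int) = 0) := by omega
    have hne' : ¬ ((n : Int) - 1 = 0) := by omega
    have hle : ¬ (n ≤ 1) := by omega
    have hr : PySem.List.pyRange 2 ((n : Int) + 1) 1
        = PySem.List.pyRange 2 ((n : Int)) 1 ++ [(n : Int)] :=
      PySem.List.pyRange_one_succ_right (by omega)
    have hc : ((n : Int) - 1 + 1) = (n : Int) := by ring
    simp only [workVal, workAcc, if_neg hne, if_neg hne', if_neg hle, hr, hc,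
      List.foldl_append, List.foldl_cons, List.foldl_nil]

theorem workAcc_succ (n : Nat) (h : 1 ≤ n) : workAcc (n + 1) = workVal (n : Int) := by
  have hle : ¬ (n + 1 ≤ 1) := by omega
  simp only [workAcc, if_neg hle]
  congr 1
  push_cast
  ring

theorem work_loop_inv (n : Nat) :
    (PySem.List.pyRange 0 (n : Int) 1).foldl workStep ([], [], 2)
      = (PySem.List.pyRange 0 (n : Int) 1,
         (PySem.List.pyRange 0 (n : Int) 1).map workVal,
         workAcc n) := by
  induction n with
  | zero => simp [PySem.List.pyRange_one_eq_nil, workAcc]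
  | succ n ih =>
    have hr : PySem.List.pyRange 0 ((n : Int) + 1) 1
        = PySem.List.pyRange 0 (n : Int) 1 ++ [(n : Int)] :=
      PySem.List.pyRange_one_succ_right (by omega)
    have hcast : ((n + 1 : Nat) : Int) = (n : Int) + 1 := by push_cast; ring
    rw [hcast, hr, List.foldl_append, ih, List.foldl_cons, List.foldl_nil, List.map_append]
    unfold workStep
    rcases Nat.eq_zero_or_pos n with h0 | hpos
    · subst h0; decide
    · have hne : (n : Int) ≠ 0 := by omega
      simp only [if_pos hne, List.map_cons, List.map_nil]
      have hget : PySem.List.pyGetD (PySem.List.pyRange 0 (n : Int) 1 ++ [(n : Int)]) ((n : Nat) : Int) 0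
          = (n : Int) := by
        rw [← hr, PySem.List.pyGetD_natCast, List.getD_eq_getElem?_getD,
          PySem.List.getElem?_pyRange_one]
        simp
      rw [hget, ← workVal_succ n hpos, workAcc_succ n hpos]

-- factor an initial accumulator out of a product-fold
theorem foldl_mul_init (l : List Int) : ∀ c : Int, l.foldl (· * ·) c = c * l.foldl (· * ·) 1 := by
  induction l with
  | nil => intro c; simp
  | cons x xs ih =>
    intro c
    simp only [List.foldl_cons]
    rw [ih (c * x), ih (1 * x)]
    ring

-- the product tree computes the sequential product of the range
theorem prodTree_eq (n : Nat) : ∀ lo hi : Int, (hi - lo).toNat = n →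
    prodTree lo hi = (PySem.List.pyRange lo hi 1).foldl (· * ·) 1 := by
  induction n using Nat.strong_induction_on with
  | _ n ih =>
    intro lo hi hn
    unfold prodTree
    by_cases h0 : hi - lo ≤ 0
    · rw [dif_pos h0, PySem.List.pyRange_one_eq_nil (by omega)]; rfl
    · rw [dif_neg h0]
      by_cases h1 : hi - lo = 1
      · rw [dif_pos h1]
        have : hi = lo + 1 := by omega
        subst this
        rw [PySem.List.pyRange_one_singleton]
        simp
      · rw [dif_neg h1]
        have h2 : 2 ≤ hi - lo := by omega
        have hmid : lo + 1 ≤ PySem.Int.floordiv (lo + hi) 2 ∧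
            PySem.Int.floordiv (lo + hi) 2 ≤ hi - 1 := by
          rw [PySem.Int.floordiv_eq_ediv_of_pos (by omega : (0:Int) < 2)]
          omega
        set mid := PySem.Int.floordiv (lo + hi) 2 with hmiddef
        have e1 : prodTree lo mid = (PySem.List.pyRange lo mid 1).foldl (· * ·) 1 :=
          ih (mid - lo).toNat (by omega) lo mid rfl
        have e2 : prodTree mid hi = (PySem.List.pyRange mid hi 1).foldl (· * ·) 1 :=
          ih (hi - mid).toNat (by omega) mid hi rfl
        show prodTree lo mid * prodTree mid hi = _
        rw [e1, e2,
          PySem.List.pyRange_one_append lo mid hi (by omega) (by omega),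
          List.foldl_append,
          foldl_mul_init (PySem.List.pyRange mid hi 1)
            (List.foldl (· * ·) 1 (PySem.List.pyRange lo mid 1))]

-- initial value of B's accumulator: 2 * prod([1, a)) = workVal (a - 1) for a ≥ 2
theorem init_p_eq (a : Int) (h : 2 ≤ a) : 2 * prodTree 1 a = workVal (a - 1) := by
  have hne : ¬ (a - 1 = 0) := by omega
  have hc : (a - 1 + 1) = a := by ring
  rw [prodTree_eq (a - 1).toNat 1 a (by omega),
    PySem.List.pyRange_one_cons (by omega : (1:Int) < a)]
  simp only [workVal, if_neg hne, hc, List.foldl_cons]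
  norm_num
  rw [foldl_mul_init (PySem.List.pyRange 2 a 1) 2]

-- exact division step: workVal (k+1) // (k+1) = workVal k for k ≥ 1
theorem div_step (k : Nat) (hk : 1 ≤ k) :
    PySem.Int.floordiv (workVal ((k : Int) + 1)) ((k : Int) + 1) = workVal (k : Int) := by
  have h1 : workVal ((k : Int) + 1) = workVal (k : Int) * ((k : Int) + 1) := by
    have := workVal_succ (k + 1) (by omega)
    rw [workAcc_succ k hk] at this
    push_cast at this ⊢
    linarith [this]
  rw [h1, PySem.Int.floordiv_eq_ediv_of_pos (by omega : (0:Int) < (k : Int) + 1),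
    Int.mul_ediv_cancel _ (by omega : ((k : Int) + 1) ≠ 0)]

-- B's downward loop: starting at p = workVal k it emits (x, workVal x) for x = k..1
theorem alt_loop_inv (k : Nat) (hk : 1 ≤ k) : ∀ out : List (Int × Int),
    (PySem.List.pyRange (k : Int) 0 (-1)).foldl workAltStep (out, workVal (k : Int))
      = (out ++ (PySem.List.pyRange (k : Int) 0 (-1)).map (fun x => (x, workVal x)),
         workVal 1) := by
  induction k with
  | zero => omega
  | succ k ih =>
    intro out
    have hcons : PySem.List.pyRange ((k + 1 : Nat) : Int) 0 (-1)
        = ((k + 1 : Nat) : Int) :: PySem.List.pyRange (((k + 1 : Nat) : Int) - 1) 0 (-1) :=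
      PySem.List.pyRange_neg_one_cons (by push_cast; omega)
    have hc : (((k + 1 : Nat) : Int) - 1) = (k : Int) := by push_cast; ring
    rcases Nat.eq_zero_or_pos k with h0 | hpos
    · subst h0
      have h1c : ((0 + 1 : Nat) : Int) = 1 := by norm_num
      have h10 : PySem.List.pyRange (1 : Int) 0 (-1) = [1] := by decide
      rw [h1c, h10]
      simp only [List.foldl_cons, List.foldl_nil, List.map_cons, List.map_nil, workAltStep,
        Prod.mk.injEq]
      exact ⟨trivial, by decide⟩
    · rw [hcons, hc, List.foldl_cons, List.map_cons]
      show (PySem.List.pyRange (k : Int) 0 (-1)).foldl workAltStep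
          (workAltStep (out, workVal ((k + 1 : Nat) : Int)) ((k + 1 : Nat) : Int)) = _
      have hstep : workAltStep (out, workVal ((k + 1 : Nat) : Int)) ((k + 1 : Nat) : Int)
          = (out ++ [(((k + 1 : Nat) : Int), workVal ((k + 1 : Nat) : Int))], workVal (k : Int)) := by
        unfold workAltStep
        have : ((k + 1 : Nat) : Int) = (k : Int) + 1 := by push_cast; ring
        rw [this, div_step k hpos]
      rw [hstep, ih hpos (out ++ [(((k + 1 : Nat) : Int), workVal ((k + 1 : Nat) : Int))]),
        List.append_assoc]
      rfl

-- B's items list, reversed, is the ascending table of workVal over range(0, a)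
theorem alt_items_eq (a : Int) (h1 : 1 ≤ a) :
    (if 1 ≤ a then
        ((PySem.List.pyRange (a - 1) 0 (-1)).foldl workAltStep ([], 2 * prodTree 1 a)).1
          ++ [((0 : Int), (1 : Int))]
      else
        ((PySem.List.pyRange (a - 1) 0 (-1)).foldl workAltStep ([], 2 * prodTree 1 a)).1).reverse
    = (PySem.List.pyRange 0 a 1).map (fun x => (x, workVal x)) := by
  rw [if_pos h1]
  rcases eq_or_lt_of_le h1 with h | h2
  · subst h
    decide
  · have h2' : 2 ≤ a := by omega
    have hk : ((a - 1).toNat : Int) = a - 1 := by omega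
    have hinv := alt_loop_inv (a - 1).toNat (by omega) []
    rw [hk] at hinv
    rw [init_p_eq a h2', hinv]
    simp only [List.nil_append]
    rw [PySem.List.pyRange_neg_one_eq_reverse]
    have hb : (0 : Int) + 1 = 1 := by ring
    have ha : a - 1 + 1 = a := by ring
    rw [hb, ha, List.map_reverse, List.reverse_append, List.reverse_reverse,
      PySem.List.pyRange_one_cons (by omega : (0 : Int) < a)]
    simp [workVal]

theorem work_eq_alt (a : Int) : work a = work_alt a := by
  by_cases h : a ≤ 0
  · show (PySem.Dict.ofList _).items = (PySem.Dict.ofList _).items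
    rw [PySem.List.pyRange_one_eq_nil h,
      PySem.List.pyRange_neg_one_eq_nil (by omega : a - 1 ≤ 0)]
    simp only [List.foldl_nil, if_neg (by omega : ¬ (1 ≤ a))]
    rfl
  · have h1 : (1 : Int) ≤ a := by omega
    have hB : work_alt a
        = (PySem.Dict.ofList ((PySem.List.pyRange 0 a 1).map (fun x => (x, workVal x)))).items := by
      show (PySem.Dict.ofList ((if 1 ≤ a then
          ((PySem.List.pyRange (a - 1) 0 (-1)).foldl workAltStep ([], 2 * prodTree 1 a)).1
            ++ [((0 : Int), (1 : Int))]
        else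
          ((PySem.List.pyRange (a - 1) 0 (-1)).foldl workAltStep ([], 2 * prodTree 1 a)).1).reverse)).items = _
      rw [alt_items_eq a h1]
    rw [hB]
    have ha : ((a.toNat : Nat) : Int) = a := Int.toNat_of_nonneg (by omega)
    have hinvA := work_loop_inv a.toNat
    rw [ha] at hinvA
    show (PySem.Dict.ofList
        (((PySem.List.pyRange 0 a 1).foldl workStep ([], [], 2)).1.zip
          ((PySem.List.pyRange 0 a 1).foldl workStep ([], [], 2)).2.1)).items = _
    rw [hinvA]
    have hz : ∀ (l : List Int), l.zip (l.map workVal) = l.map (fun x => (x, workVal x)) := by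
      intro l
      induction l with
      | nil => rfl
      | cons x xs ih => simp [ih]
    show (PySem.Dict.ofList ((PySem.List.pyRange 0 a 1).zip
      ((PySem.List.pyRange 0 a 1).map workVal))).items = _
    rw [hz]

-- ===== VERDICT (by name: the statement is the Claim_ definition above) =====
theorem work_spec : Claim_equal_work := by
  intro a _
  exact work_eq_alt a
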